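-- pv_equiv track=rewrite | github.com/morita657/Algorithms | Leetcode_solutions/frequency-queries.py | freqQuery
-- ===== SOURCE A (Python) =====
-- from collections import defaultdict
--
-- def freqQuery(queries):
--     elementFreq = defaultdict(int)
--     freqCount = defaultdict(int)
--     ans = []
--     for i, j in queries:
--         if i == 1:
--             if freqCount[elementFreq[j]]:
--                 freqCount[elementFreq[j]] -= 1
--             elementFreq[j] += 1
--             freqCount[elementFreq[j]] += 1
--         elif i == 2:
--             if elementFreq[j]:
--                 freqCount[elementFreq[j]] -= 1
--                 elementFreq[j] -= 1
--                 freqCount[elementFreq[j]] += 1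
--         else:
--             # operation 3
--             if j in freqCount and freqCount[j]:
--                 ans.append(1)
--             else:
--                 ans.append(0)
--     return ans
-- ===== SOURCE B (Python) =====
-- def freqQuery(queries):
--     elementFreq = {}
--     ans = []
--     for i, j in queries:
--         if i == 1:
--             elementFreq[j] = elementFreq.get(j, 0) + 1
--         elif i == 2:
--             if elementFreq.get(j, 0):
--                 elementFreq[j] -= 1
--         else:
--             ans.append(1 if j in elementFreq.values() else 0)
--     return ans
-- ===== Notes on version B (the rewrite author's own statement) =====
-- stated objective: simpler
-- what changed: B drops A's count-of-counts map entirely: it keeps a single element->frequency dict and answers an op-3 query by scanning the dict's values for the queried frequency instead of an O(1) lookup in the second map.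
-- outside the precondition, e.g. on freqQuery([(1, 1), (2, 1), (1, 2), (3, 0)]): A returns [0], B returns [1]
import Mathlib
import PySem

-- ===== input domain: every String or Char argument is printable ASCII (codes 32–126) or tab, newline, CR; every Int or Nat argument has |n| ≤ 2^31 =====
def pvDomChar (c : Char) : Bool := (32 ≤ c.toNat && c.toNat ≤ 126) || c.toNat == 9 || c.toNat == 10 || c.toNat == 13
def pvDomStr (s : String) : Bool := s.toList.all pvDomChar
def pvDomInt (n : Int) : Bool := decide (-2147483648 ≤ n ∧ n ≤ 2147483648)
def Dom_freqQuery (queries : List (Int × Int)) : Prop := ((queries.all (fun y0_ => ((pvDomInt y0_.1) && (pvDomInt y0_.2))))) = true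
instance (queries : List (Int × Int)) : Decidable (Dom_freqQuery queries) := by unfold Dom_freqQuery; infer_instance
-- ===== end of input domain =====

-- B drops A's count-of-counts map: one element→frequency dict, op-3 scans its values (simpler).

-- ===== PORT A =====
-- A keeps two defaultdict(int)s: elementFreq and freqCount (count of counts).
-- A defaultdict(int) read 'd[k]' inserts 0 when k is absent: modelled as 'd.setdefault k 0'
-- paired with the value 'd.getD k 0'; each Python subscript read below does both, in A's order.
def stepA (s : PySem.Dict Int Int × PySem.Dict Int Int × List Int) (q : Int × Int) :
    PySem.Dict Int Int × PySem.Dict Int Int × List Int :=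
  if q.1 = 1 then
    -- if freqCount[elementFreq[j]]: freqCount[elementFreq[j]] -= 1
    let f0 := s.1.getD q.2 0
    let eF1 := s.1.setdefault q.2 0
    let c0 := s.2.1.getD f0 0
    let fC1 := s.2.1.setdefault f0 0
    let fC2 := if c0 ≠ 0 then fC1.insert f0 (c0 - 1) else fC1
    -- elementFreq[j] += 1
    let eF2 := eF1.insert q.2 (f0 + 1)
    -- freqCount[elementFreq[j]] += 1
    let c1 := fC2.getD (f0 + 1) 0
    let fC3 := (fC2.setdefault (f0 + 1) 0).insert (f0 + 1) (c1 + 1)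
    (eF2, fC3, s.2.2)
  else if q.1 = 2 then
    -- if elementFreq[j]:
    let f0 := s.1.getD q.2 0
    let eF1 := s.1.setdefault q.2 0
    if f0 ≠ 0 then
      -- freqCount[elementFreq[j]] -= 1
      let c0 := s.2.1.getD f0 0
      let fC2 := (s.2.1.setdefault f0 0).insert f0 (c0 - 1)
      -- elementFreq[j] -= 1
      let eF2 := eF1.insert q.2 (f0 - 1)
      -- freqCount[elementFreq[j]] += 1
      let c1 := fC2.getD (f0 - 1) 0
      let fC3 := (fC2.setdefault (f0 - 1) 0).insert (f0 - 1) (c1 + 1)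
      (eF2, fC3, s.2.2)
    else (eF1, s.2.1, s.2.2)
  else
    -- if j in freqCount and freqCount[j]: ans.append(1) else ans.append(0)
    (s.1, s.2.1,
      s.2.2 ++ [if s.2.1.contains q.2 = true ∧ s.2.1.getD q.2 0 ≠ 0 then (1 : Int) else 0])

def freqQuery (queries : List (Int × Int)) : List Int :=
  (queries.foldl stepA (PySem.Dict.empty, PySem.Dict.empty, ([] : List Int))).2.2

-- ===== PORT B =====
-- B keeps a single plain dict elementFreq; op-3 is 'j in elementFreq.values()'.
def stepB (s : PySem.Dict Int Int × List Int) (q : Int × Int) :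
    PySem.Dict Int Int × List Int :=
  if q.1 = 1 then
    -- elementFreq[j] = elementFreq.get(j, 0) + 1
    (s.1.insert q.2 (s.1.getD q.2 0 + 1), s.2)
  else if q.1 = 2 then
    -- if elementFreq.get(j, 0): elementFreq[j] -= 1
    if s.1.getD q.2 0 ≠ 0 then (s.1.insert q.2 (s.1.getD q.2 0 - 1), s.2) else s
  else
    -- ans.append(1 if j in elementFreq.values() else 0)
    (s.1, s.2 ++ [if q.2 ∈ s.1.values then (1 : Int) else 0])

def freqQuery_alt (queries : List (Int × Int)) : List Int :=
  (queries.foldl stepB (PySem.Dict.empty, ([] : List Int))).2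

-- ===== PRECONDITION & SPEC =====
-- Pre_ excludes inputs containing a type-3 query asking for frequency 0: there A's answer is an
-- accident of its count-of-counts bookkeeping (its zero-frequency counter is path-dependent) while
-- B reports whether some tracked element currently has count 0 — a corner no specification covers
-- (the underlying problem queries only positive frequencies), on which both answers are defensible.
def Pre_freqQuery (queries : List (Int × Int)) : Prop :=
  ∀ q ∈ queries, q.1 = 1 ∨ q.1 = 2 ∨ q.2 ≠ 0
instance (queries : List (Int × Int)) : Decidable (Pre_freqQuery queries) := by
  unfold Pre_freqQuery; infer_instance

def pvWitness_freqQuery : (List (Int × Int)) := [(1, 5), (3, 1), (2, 5), (3, 1)]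

def Spec_freqQuery (queries : List (Int × Int)) (out : List Int) : Prop := out = freqQuery_alt queries
instance (queries : List (Int × Int)) (out : List Int) : Decidable (Spec_freqQuery queries out) := by unfold Spec_freqQuery; infer_instance

-- ===== CLAIM (what is proved, stated in full; the proofs are below) =====
def Claim_equal_freqQuery : Prop := ∀ (queries : List (Int × Int)), Dom_freqQuery queries → Pre_freqQuery queries → Spec_freqQuery queries (freqQuery queries)

-- ===== LEMMAS AND PROOFS =====

-- getD with default 0 is transparent to a defaultdict-read's setdefault
lemma getD_sd (d : PySem.Dict Int Int) (k x : Int) :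
    (d.setdefault k 0).getD x 0 = d.getD x 0 := by
  by_cases h : d.contains k = true
  · rw [PySem.Dict.setdefault_of_contains _ 0 h]
  · rw [PySem.Dict.setdefault_of_not_contains _ 0 (by simpa using h), PySem.Dict.getD_insert]
    split_ifs with hx
    · subst hx; exact (PySem.Dict.getD_of_not_contains d 0 (by simpa using h)).symm
    · rfl

lemma nodup_sd (d : PySem.Dict Int Int) (k : Int) (h : d.keys.Nodup) :
    (d.setdefault k 0).keys.Nodup := by
  by_cases hc : d.contains k = true
  · rwa [PySem.Dict.setdefault_of_contains _ 0 hc]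
  · rw [PySem.Dict.setdefault_of_not_contains _ 0 (by simpa using hc)]
    exact PySem.Dict.nodup_keys_insert d k 0 h

-- a setdefault-then-overwrite at the same key is a plain overwrite
lemma sd_insert (d : PySem.Dict Int Int) (k v : Int) :
    (d.setdefault k 0).insert k v = d.insert k v := by
  by_cases h : d.contains k = true
  · rw [PySem.Dict.setdefault_of_contains _ 0 h]
  · rw [PySem.Dict.setdefault_of_not_contains _ 0 (by simpa using h),
        PySem.Dict.insert_insert_self]

-- a nonzero value sits at a genuine key
lemma mem_keys_of_getD_ne (d : PySem.Dict Int Int) (k : Int) (h : d.getD k 0 ≠ 0) :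
    k ∈ d.keys := by
  by_cases hc : d.contains k = true
  · rw [PySem.Dict.contains_eq_decide_mem_keys] at hc; simpa using hc
  · exact absurd (PySem.Dict.getD_of_not_contains d 0 (by simpa using hc)) h

-- the number of keys of 'd' holding value f (as an Int), for the frequency-count invariant
def cnt (d : PySem.Dict Int Int) (f : Int) : Int :=
  (d.keys.countP (fun k => d.getD k 0 == f) : Int)

lemma cnt_ne_iff (d : PySem.Dict Int Int) (f : Int) (hf : f ≠ 0) :
    cnt d f ≠ 0 ↔ ∃ k, d.getD k 0 = f := by
  unfold cnt
  rw [Int.natCast_ne_zero, ← Nat.pos_iff_ne_zero, List.countP_pos_iff]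
  constructor
  · rintro ⟨k, -, hk⟩; exact ⟨k, by simpa using hk⟩
  · rintro ⟨k, hk⟩
    exact ⟨k, mem_keys_of_getD_ne d k (hk ▸ hf), by simpa using hk⟩

lemma cnt_pos_of_getD (d : PySem.Dict Int Int) (k : Int) (h : d.getD k 0 ≠ 0) :
    cnt d (d.getD k 0) ≠ 0 :=
  (cnt_ne_iff d _ h).mpr ⟨k, rfl⟩

-- how cnt changes under an overwrite: scored at any f ≠ 0
lemma cnt_insert (d : PySem.Dict Int Int) (hnd : d.keys.Nodup) (j v f : Int) (hf : f ≠ 0) :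
    cnt (d.insert j v) f + (if d.getD j 0 = f then 1 else 0)
      = cnt d f + (if v = f then 1 else 0) := by
  unfold cnt
  by_cases hc : d.contains j = true
  · have hj : j ∈ d.keys := by
      rw [PySem.Dict.contains_eq_decide_mem_keys] at hc; simpa using hc
    have hperm := List.perm_cons_erase hj
    have hne : j ∉ d.keys.erase j := hnd.not_mem_erase
    rw [PySem.Dict.keys_insert_of_contains d v hc]
    rw [hperm.countP_eq (fun k => (d.insert j v).getD k 0 == f),
        hperm.countP_eq (fun k => d.getD k 0 == f)]
    simp only [List.countP_cons]
    have hrest : (d.keys.erase j).countP (fun k => (d.insert j v).getD k 0 == f)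
        = (d.keys.erase j).countP (fun k => d.getD k 0 == f) := by
      apply List.countP_congr
      intro k hk
      have : k ≠ j := fun h => hne (h ▸ hk)
      rw [PySem.Dict.getD_insert]
      simp [this]
    rw [hrest, PySem.Dict.getD_insert]
    push_cast
    by_cases h1 : v = f <;> by_cases h2 : d.getD j 0 = f <;> simp [h1, h2]
  · have hj : j ∉ d.keys := by
      rw [PySem.Dict.contains_eq_decide_mem_keys] at hc; simpa using hc
    have hd0 : d.getD j 0 = 0 := PySem.Dict.getD_of_not_contains d 0 (by simpa using hc)
    rw [PySem.Dict.keys_insert_of_not_contains d v (by simpa using hc)]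
    rw [List.countP_append]
    have hrest : d.keys.countP (fun k => (d.insert j v).getD k 0 == f)
        = d.keys.countP (fun k => d.getD k 0 == f) := by
      apply List.countP_congr
      intro k hk
      have : k ≠ j := fun h => hj (h ▸ hk)
      rw [PySem.Dict.getD_insert]; simp [this]
    rw [hrest]
    simp only [List.countP_cons, List.countP_nil, PySem.Dict.getD_insert, hd0]
    have : ¬ ((0 : Int) = f) := fun h => hf h.symm
    push_cast
    simp [this, beq_iff_eq]

-- cnt is unchanged by a defaultdict read (setdefault k 0), for f ≠ 0
lemma cnt_sd (d : PySem.Dict Int Int) (k f : Int) (hf : f ≠ 0) :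
    cnt (d.setdefault k 0) f = cnt d f := by
  unfold cnt
  by_cases hc : d.contains k = true
  · rw [PySem.Dict.setdefault_of_contains _ 0 hc]
  · rw [PySem.Dict.setdefault_of_not_contains _ 0 (by simpa using hc)]
    rw [PySem.Dict.keys_insert_of_not_contains d 0 (by simpa using hc), List.countP_append]
    have hk : k ∉ d.keys := by
      rw [PySem.Dict.contains_eq_decide_mem_keys] at hc; simpa using hc
    have hrest : d.keys.countP (fun x => (d.insert k 0).getD x 0 == f)
        = d.keys.countP (fun x => d.getD x 0 == f) := by
      apply List.countP_congr
      intro x hx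
      have : x ≠ k := fun h => hk (h ▸ hx)
      rw [PySem.Dict.getD_insert]; simp [this]
    rw [hrest]
    have h0f : ¬ ((0 : Int) = f) := fun h => hf h.symm
    simp [PySem.Dict.getD_insert, beq_iff_eq, h0f]

-- the loop invariant tying A's state (eFA, fC) to B's state eFB
def InvAB (eFA fC eFB : PySem.Dict Int Int) : Prop :=
  eFA.keys.Nodup ∧ fC.keys.Nodup ∧ eFB.keys.Nodup ∧
  (∀ k, eFA.getD k 0 = eFB.getD k 0) ∧
  (∀ k, 0 ≤ eFA.getD k 0) ∧
  (∀ f, f ≠ 0 → fC.getD f 0 = cnt eFA f)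

lemma stepA_op1 (eFA fC : PySem.Dict Int Int) (ans : List Int) (j : Int) :
    stepA (eFA, fC, ans) (1, j) =
      (eFA.insert j (eFA.getD j 0 + 1),
       (if fC.getD (eFA.getD j 0) 0 ≠ 0
          then fC.insert (eFA.getD j 0) (fC.getD (eFA.getD j 0) 0 - 1)
          else fC.setdefault (eFA.getD j 0) 0).insert (eFA.getD j 0 + 1)
         (fC.getD (eFA.getD j 0 + 1) 0 + 1),
       ans) := by
  have hne : eFA.getD j 0 + 1 ≠ eFA.getD j 0 := by omega
  by_cases hc : fC.getD (eFA.getD j 0) 0 ≠ 0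
  · simp [stepA, hc, sd_insert, PySem.Dict.getD_insert, hne]
  · simp [stepA, hc, sd_insert, getD_sd]

lemma stepA_op2t (eFA fC : PySem.Dict Int Int) (ans : List Int) (j : Int)
    (h : eFA.getD j 0 ≠ 0) :
    stepA (eFA, fC, ans) (2, j) =
      (eFA.insert j (eFA.getD j 0 - 1),
       (fC.insert (eFA.getD j 0) (fC.getD (eFA.getD j 0) 0 - 1)).insert (eFA.getD j 0 - 1)
         ((fC.insert (eFA.getD j 0) (fC.getD (eFA.getD j 0) 0 - 1)).getD (eFA.getD j 0 - 1) 0 + 1),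
       ans) := by
  have hne : (2 : Int) ≠ 1 := by omega
  simp [stepA, hne, h, sd_insert]

lemma stepA_op2f (eFA fC : PySem.Dict Int Int) (ans : List Int) (j : Int)
    (h : eFA.getD j 0 = 0) :
    stepA (eFA, fC, ans) (2, j) = (eFA.setdefault j 0, fC, ans) := by
  have hne : (2 : Int) ≠ 1 := by omega
  simp [stepA, hne, h]

lemma stepA_op3 (eFA fC : PySem.Dict Int Int) (ans : List Int) (i j : Int)
    (h1 : i ≠ 1) (h2 : i ≠ 2) :
    stepA (eFA, fC, ans) (i, j) =
      (eFA, fC, ans ++ [if fC.contains j = true ∧ fC.getD j 0 ≠ 0 then (1 : Int) else 0]) := by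
  simp [stepA, h1, h2]

lemma stepB_op1 (eFB : PySem.Dict Int Int) (ans : List Int) (j : Int) :
    stepB (eFB, ans) (1, j) = (eFB.insert j (eFB.getD j 0 + 1), ans) := by
  simp [stepB]

lemma stepB_op2t (eFB : PySem.Dict Int Int) (ans : List Int) (j : Int)
    (h : eFB.getD j 0 ≠ 0) :
    stepB (eFB, ans) (2, j) = (eFB.insert j (eFB.getD j 0 - 1), ans) := by
  have hne : (2 : Int) ≠ 1 := by omega
  simp [stepB, hne, h]

lemma stepB_op2f (eFB : PySem.Dict Int Int) (ans : List Int) (j : Int)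
    (h : eFB.getD j 0 = 0) :
    stepB (eFB, ans) (2, j) = (eFB, ans) := by
  have hne : (2 : Int) ≠ 1 := by omega
  simp [stepB, hne, h]

lemma stepB_op3 (eFB : PySem.Dict Int Int) (ans : List Int) (i j : Int)
    (h1 : i ≠ 1) (h2 : i ≠ 2) :
    stepB (eFB, ans) (i, j) = (eFB, ans ++ [if j ∈ eFB.values then (1 : Int) else 0]) := by
  simp [stepB, h1, h2]

lemma values_char (d : PySem.Dict Int Int) (hnd : d.keys.Nodup) (f : Int) (hf : f ≠ 0) :
    f ∈ d.values ↔ ∃ k, d.getD k 0 = f := by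
  rw [PySem.Dict.values_eq_map_keys d hnd 0, List.mem_map]
  constructor
  · rintro ⟨k, -, hk⟩; exact ⟨k, hk⟩
  · rintro ⟨k, hk⟩; exact ⟨k, mem_keys_of_getD_ne d k (hk ▸ hf), hk⟩

lemma step_sync (eFA fC eFB : PySem.Dict Int Int) (ans : List Int) (q : Int × Int)
    (hI : InvAB eFA fC eFB) (hq : q.1 = 1 ∨ q.1 = 2 ∨ q.2 ≠ 0) :
    InvAB (stepA (eFA, fC, ans) q).1 (stepA (eFA, fC, ans) q).2.1 (stepB (eFB, ans) q).1 ∧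
    (stepA (eFA, fC, ans) q).2.2 = (stepB (eFB, ans) q).2 := by
  obtain ⟨i, j⟩ := q
  obtain ⟨hA, hC, hB, hEq, hNN, hCnt⟩ := hI
  by_cases hi1 : i = 1
  · subst hi1
    rw [stepA_op1, stepB_op1]
    dsimp only
    refine ⟨⟨PySem.Dict.nodup_keys_insert _ _ _ hA, ?_, PySem.Dict.nodup_keys_insert _ _ _ hB, ?_, ?_, ?_⟩, rfl⟩
    · split_ifs with hc0
      · exact PySem.Dict.nodup_keys_insert _ _ _ (PySem.Dict.nodup_keys_insert _ _ _ hC)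
      · exact PySem.Dict.nodup_keys_insert _ _ _ (nodup_sd _ _ hC)
    · intro k
      rw [PySem.Dict.getD_insert, PySem.Dict.getD_insert, ← hEq j]
      split_ifs with h
      · rfl
      · exact hEq k
    · intro k
      rw [PySem.Dict.getD_insert]
      split_ifs with h
      · have := hNN j; omega
      · exact hNN k
    · intro f hf
      have hnnj := hNN j
      have hcins := cnt_insert eFA hA j (eFA.getD j 0 + 1) f hf
      rw [PySem.Dict.getD_insert]
      split_ifs with h1 hc0
      · -- f = f0 + 1
        have e1 : fC.getD (eFA.getD j 0 + 1) 0 = cnt eFA (eFA.getD j 0 + 1) :=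
          hCnt _ (by omega)
        rw [if_neg (by omega), if_pos (by omega)] at hcins
        rw [h1] at hcins ⊢
        omega
      · -- f ≠ f0 + 1, decrement guard fired
        rw [PySem.Dict.getD_insert]
        split_ifs with h2
        · have e0 : fC.getD (eFA.getD j 0) 0 = cnt eFA (eFA.getD j 0) :=
            hCnt _ (by omega)
          rw [if_pos (by omega), if_neg (by omega)] at hcins
          rw [h2] at hcins ⊢
          omega
        · have e0 : fC.getD f 0 = cnt eFA f := hCnt f hf
          rw [if_neg (by omega), if_neg (by omega)] at hcins
          omega
      · -- f ≠ f0 + 1, guard did not fire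
        rw [getD_sd]
        by_cases h2 : f = eFA.getD j 0
        · -- impossible: the count at a nonzero held value is positive
          have hj0 : eFA.getD j 0 ≠ 0 := by omega
          have hpos := cnt_pos_of_getD eFA j hj0
          have e0 : fC.getD (eFA.getD j 0) 0 = cnt eFA (eFA.getD j 0) := hCnt _ hj0
          omega
        · have e0 : fC.getD f 0 = cnt eFA f := hCnt f hf
          rw [if_neg (by omega), if_neg (by omega)] at hcins
          omega
  · by_cases hi2 : i = 2
    · subst hi2
      by_cases hz : eFA.getD j 0 = 0
      · rw [stepA_op2f _ _ _ _ hz, stepB_op2f _ _ _ (by rw [← hEq j]; exact hz)]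
        dsimp only
        refine ⟨⟨nodup_sd _ _ hA, hC, hB, ?_, ?_, ?_⟩, rfl⟩
        · intro k; rw [getD_sd]; exact hEq k
        · intro k; rw [getD_sd]; exact hNN k
        · intro f hf; rw [cnt_sd _ _ _ hf]; exact hCnt f hf
      · rw [stepA_op2t _ _ _ _ hz, stepB_op2t _ _ _ (by rw [← hEq j]; exact hz)]
        dsimp only
        refine ⟨⟨PySem.Dict.nodup_keys_insert _ _ _ hA,
          PySem.Dict.nodup_keys_insert _ _ _ (PySem.Dict.nodup_keys_insert _ _ _ hC),
          PySem.Dict.nodup_keys_insert _ _ _ hB, ?_, ?_, ?_⟩, rfl⟩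
        · intro k
          rw [PySem.Dict.getD_insert, PySem.Dict.getD_insert, ← hEq j]
          split_ifs with h
          · rfl
          · exact hEq k
        · intro k
          rw [PySem.Dict.getD_insert]
          split_ifs with h
          · have := hNN j; omega
          · exact hNN k
        · intro f hf
          have hnnj := hNN j
          have hcins := cnt_insert eFA hA j (eFA.getD j 0 - 1) f hf
          rw [PySem.Dict.getD_insert]
          split_ifs with h1
          · -- f = f0 - 1
            rw [PySem.Dict.getD_insert, if_neg (by omega)]
            have e1 : fC.getD (eFA.getD j 0 - 1) 0 = cnt eFA (eFA.getD j 0 - 1) :=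
              hCnt _ (by omega)
            rw [if_neg (by omega), if_pos (by omega)] at hcins
            rw [h1] at hcins ⊢
            omega
          · rw [PySem.Dict.getD_insert]
            split_ifs with h2
            · have e0 : fC.getD (eFA.getD j 0) 0 = cnt eFA (eFA.getD j 0) :=
                hCnt _ hz
              rw [if_pos (by omega), if_neg (by omega)] at hcins
              rw [h2] at hcins ⊢
              omega
            · have e0 : fC.getD f 0 = cnt eFA f := hCnt f hf
              rw [if_neg (by omega), if_neg (by omega)] at hcins
              omega
    · have hj : j ≠ 0 := by
        rcases hq with h | h | h
        · exact absurd h hi1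
        · exact absurd h hi2
        · exact h
      rw [stepA_op3 _ _ _ _ _ hi1 hi2, stepB_op3 _ _ _ _ hi1 hi2]
      dsimp only
      refine ⟨⟨hA, hC, hB, hEq, hNN, hCnt⟩, ?_⟩
      have hiff : (fC.contains j = true ∧ fC.getD j 0 ≠ 0) ↔ (j ∈ eFB.values) := by
        rw [values_char eFB hB j hj]
        constructor
        · rintro ⟨-, hne0⟩
          have e := hCnt j hj
          obtain ⟨k, hk⟩ := (cnt_ne_iff eFA j hj).mp (by omega)
          exact ⟨k, by rw [← hEq k]; exact hk⟩
        · rintro ⟨k, hk⟩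
          have hk' : eFA.getD k 0 = j := by rw [hEq k]; exact hk
          have hcne : cnt eFA j ≠ 0 := (cnt_ne_iff eFA j hj).mpr ⟨k, hk'⟩
          have e := hCnt j hj
          have hgne : fC.getD j 0 ≠ 0 := by omega
          refine ⟨?_, hgne⟩
          by_cases hcon : fC.contains j = true
          · exact hcon
          · exact absurd (PySem.Dict.getD_of_not_contains fC 0 (by simpa using hcon)) hgne
      rw [if_congr hiff rfl rfl]

lemma loop_sync (qs : List (Int × Int)) (eFA fC eFB : PySem.Dict Int Int) (ans : List Int)
    (hI : InvAB eFA fC eFB) (hq : ∀ q ∈ qs, q.1 = 1 ∨ q.1 = 2 ∨ q.2 ≠ 0) :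
    (qs.foldl stepA (eFA, fC, ans)).2.2 = (qs.foldl stepB (eFB, ans)).2 := by
  induction qs generalizing eFA fC eFB ans with
  | nil => rfl
  | cons q qs ih =>
    obtain ⟨hI', hans⟩ := step_sync eFA fC eFB ans q hI (hq q (List.mem_cons_self))
    simp only [List.foldl_cons]
    have hA : stepA (eFA, fC, ans) q
        = ((stepA (eFA, fC, ans) q).1, (stepA (eFA, fC, ans) q).2.1, (stepA (eFA, fC, ans) q).2.2) := rfl
    have hB : stepB (eFB, ans) q = ((stepB (eFB, ans) q).1, (stepB (eFB, ans) q).2) := rfl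
    rw [hA, hB, hans]
    exact ih _ _ _ _ hI' (fun p hp => hq p (List.mem_cons_of_mem q hp))

-- ===== VERDICT (by name: the statement is the Claim_ definition above) =====
theorem freqQuery_spec : Claim_equal_freqQuery := by
  intro queries _ hpre
  unfold Spec_freqQuery freqQuery freqQuery_alt
  apply loop_sync
  · refine ⟨PySem.Dict.nodup_keys_empty, PySem.Dict.nodup_keys_empty, PySem.Dict.nodup_keys_empty, ?_, ?_, ?_⟩
    · intro k; simp [pysem]
    · intro k; simp [pysem]
    · intro f hf; simp [pysem, cnt]
  · exact hpre
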